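-- pv_equiv track=rewrite | github.com/MikeWangWZHL/BLIP | data_engineering/srl_stats.py | get_arg0_arg1_from_srl_result
-- ===== SOURCE A (Python) =====
-- def get_arg0_arg1_from_srl_result(verb_obj, words):
--     arg0_indices = []
--     arg1_indices = []
--     for i in range(len(verb_obj['tags'])):
--         tag = verb_obj['tags'][i]
--         parsed_tag = tag.split('-')
--         if len(parsed_tag) < 2:
--             continue
--         if parsed_tag[1] == 'ARG0':
--             arg0_indices.append(i)
--         elif parsed_tag[1] == 'ARG1':
--             arg1_indices.append(i)
--     if arg0_indices:
--         arg0 = ' '.join(words[arg0_indices[0]:arg0_indices[-1]+1])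
--     else:
--         arg0 = ''
--     if arg1_indices:
--         arg1 = ' '.join(words[arg1_indices[0]:arg1_indices[-1]+1])
--     else:
--         arg1 = ''
--     return arg0, arg1
-- ===== SOURCE B (Python) =====
-- def _span(label, tags, words):
--     first = last = None
--     for i, tag in enumerate(tags):
--         parsed = tag.split('-')
--         if len(parsed) >= 2 and parsed[1] == label:
--             if first is None:
--                 first = i
--             last = i
--     if first is None:
--         return ''
--     return ' '.join(words[first:last + 1])
--
--
-- def get_arg0_arg1_from_srl_result(verb_obj, words):
--     tags = verb_obj['tags']
--     return _span('ARG0', tags, words), _span('ARG1', tags, words)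
-- ===== Notes on version B (the rewrite author's own statement) =====
-- stated objective: simpler
-- what changed: Replaces the single combined loop that accumulates full index lists for both roles with a per-label helper that scans once tracking only the first/last matching position, called twice.
import Mathlib
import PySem

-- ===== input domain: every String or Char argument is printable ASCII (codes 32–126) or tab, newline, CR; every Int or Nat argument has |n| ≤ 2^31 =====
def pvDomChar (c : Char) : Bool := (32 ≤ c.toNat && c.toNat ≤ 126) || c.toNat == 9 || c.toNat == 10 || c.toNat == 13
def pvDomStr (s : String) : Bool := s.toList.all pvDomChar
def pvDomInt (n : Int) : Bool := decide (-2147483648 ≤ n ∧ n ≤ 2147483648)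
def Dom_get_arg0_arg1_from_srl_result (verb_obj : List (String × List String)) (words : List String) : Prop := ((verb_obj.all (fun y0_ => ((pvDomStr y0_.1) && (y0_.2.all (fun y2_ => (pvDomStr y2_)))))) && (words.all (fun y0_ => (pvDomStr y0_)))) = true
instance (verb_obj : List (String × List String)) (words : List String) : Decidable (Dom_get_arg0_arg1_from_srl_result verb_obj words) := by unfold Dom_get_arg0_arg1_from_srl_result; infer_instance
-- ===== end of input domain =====

-- B replaces A's combined index-list-collecting loop by a per-label helper that
-- scans once tracking only first/last matching positions, called twice (simpler).


-- ===== PORT A =====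
-- transliteration of A: one loop over the tags collecting arg0_indices and
-- arg1_indices (elif), then inclusive slices words[first:last+1] joined by ' '.
def get_arg0_arg1_from_srl_result (verb_obj : List (String × List String)) (words : List String) : String × String :=
  match (PySem.Dict.mk verb_obj).get? "tags" with
  | none => ("", "")   -- KeyError in Python; excluded by Pre_
  | some tags =>
    let p := (PySem.List.enumerate tags 0).foldl
      (fun (acc : List Int × List Int) iv =>
        if ((PySem.Str.split? iv.2 "-").getD []).length < 2 then acc
        else if PySem.List.pyGetD ((PySem.Str.split? iv.2 "-").getD []) 1 "" == "ARG0" then (acc.1 ++ [iv.1], acc.2)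
        else if PySem.List.pyGetD ((PySem.Str.split? iv.2 "-").getD []) 1 "" == "ARG1" then (acc.1, acc.2 ++ [iv.1])
        else acc) ([], [])
    let arg0 :=
      match p.1.head?, p.1.getLast? with
      | some f, some l => PySem.Str.join " " (PySem.List.slice words (some f) (some (l + 1)))
      | _, _ => ""
    let arg1 :=
      match p.2.head?, p.2.getLast? with
      | some f, some l => PySem.Str.join " " (PySem.List.slice words (some f) (some (l + 1)))
      | _, _ => ""
    (arg0, arg1)

-- ===== PORT B =====
-- transliteration of Source B's _span: one scan tracking only (first, last).
-- Source B's guard 'len(parsed) >= 2 and parsed[1] == label', as one boolean: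
def pvQ (label : String) (iv : Int × String) : Bool :=
  2 ≤ ((PySem.Str.split? iv.2 "-").getD []).length
    && PySem.List.pyGetD ((PySem.Str.split? iv.2 "-").getD []) 1 "" == label

def pvSpan (label : String) (tags : List String) (words : List String) : String :=
  let fl := (PySem.List.enumerate tags 0).foldl
    (fun (st : Option (Int × Int)) iv =>
      if pvQ label iv then
        match st with
        | none => some (iv.1, iv.1)
        | some (f, _) => some (f, iv.1)
      else st) none
  match fl with
  | none => ""
  | some (f, l) => PySem.Str.join " " (PySem.List.slice words (some f) (some (l + 1)))

def get_arg0_arg1_from_srl_result_alt (verb_obj : List (String × List String)) (words : List String) : String × String :=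
  match (PySem.Dict.mk verb_obj).get? "tags" with
  | none => ("", "")   -- KeyError in Python; excluded by Pre_
  | some tags => (pvSpan "ARG0" tags words, pvSpan "ARG1" tags words)

-- ===== PRECONDITION & SPEC =====
-- Pre_ excludes exactly the inputs with no 'tags' key, where both A and B raise KeyError.
def Pre_get_arg0_arg1_from_srl_result (verb_obj : List (String × List String)) (words : List String) : Prop :=
  (verb_obj.map Prod.fst).contains "tags" = true
instance (verb_obj : List (String × List String)) (words : List String) : Decidable (Pre_get_arg0_arg1_from_srl_result verb_obj words) := by unfold Pre_get_arg0_arg1_from_srl_result; infer_instance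

def pvWitness_get_arg0_arg1_from_srl_result : (List (String × List String)) × List String :=
  ([("tags", ["B-ARG0", "O", "B-ARG1"])], ["the", "cat", "ran"])

def Spec_get_arg0_arg1_from_srl_result (verb_obj : List (String × List String)) (words : List String) (out : String × String) : Prop := out = get_arg0_arg1_from_srl_result_alt verb_obj words
instance (verb_obj : List (String × List String)) (words : List String) (out : String × String) : Decidable (Spec_get_arg0_arg1_from_srl_result verb_obj words out) := by unfold Spec_get_arg0_arg1_from_srl_result; infer_instance

-- ===== CLAIM (what is proved, stated in full; the proofs are below) =====
def Claim_equal_get_arg0_arg1_from_srl_result : Prop := ∀ (verb_obj : List (String × List String)) (words : List String), Dom_get_arg0_arg1_from_srl_result verb_obj words → Pre_get_arg0_arg1_from_srl_result verb_obj words → Spec_get_arg0_arg1_from_srl_result verb_obj words (get_arg0_arg1_from_srl_result verb_obj words)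

-- ===== LEMMAS AND PROOFS =====

-- A's pair fold appends an index to the first list on ARG0 and (elif) to the second on ARG1.
theorem pvPairFold_eq :
    ∀ (l : List (Int × String)) (acc : List Int × List Int),
      l.foldl (fun (acc : List Int × List Int) iv =>
        if ((PySem.Str.split? iv.2 "-").getD []).length < 2 then acc
        else if PySem.List.pyGetD ((PySem.Str.split? iv.2 "-").getD []) 1 "" == "ARG0" then (acc.1 ++ [iv.1], acc.2)
        else if PySem.List.pyGetD ((PySem.Str.split? iv.2 "-").getD []) 1 "" == "ARG1" then (acc.1, acc.2 ++ [iv.1])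
        else acc) acc
      = (acc.1 ++ (l.filter (pvQ "ARG0")).map (·.1), acc.2 ++ (l.filter (pvQ "ARG1")).map (·.1)) := by
  intro l
  induction l with
  | nil => intro acc; simp
  | cons h t ih =>
    intro acc
    rw [List.foldl_cons]
    by_cases hlen : ((PySem.Str.split? h.2 "-").getD []).length < 2
    · rw [if_pos hlen, ih]
      have q0 : pvQ "ARG0" h = false := by simp [pvQ]; omega
      have q1 : pvQ "ARG1" h = false := by simp [pvQ]; omega
      simp [q0, q1]
    · rw [if_neg hlen]
      by_cases h0 : (PySem.List.pyGetD ((PySem.Str.split? h.2 "-").getD []) 1 "" == "ARG0") = true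
      · rw [if_pos h0, ih]
        have q0 : pvQ "ARG0" h = true := by simp only [pvQ]; rw [h0]; simp; omega
        have q1 : pvQ "ARG1" h = false := by
          simp only [pvQ]; rw [beq_iff_eq.mp h0]; simp
        simp [q0, q1]
      · rw [if_neg h0]
        by_cases h1 : (PySem.List.pyGetD ((PySem.Str.split? h.2 "-").getD []) 1 "" == "ARG1") = true
        · rw [if_pos h1, ih]
          have q0 : pvQ "ARG0" h = false := by
            rw [Bool.not_eq_true] at h0; simp [pvQ, h0]
          have q1 : pvQ "ARG1" h = true := by simp only [pvQ]; rw [h1]; simp; omega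
          simp [q0, q1]
        · rw [if_neg h1, ih]
          have q0 : pvQ "ARG0" h = false := by
            rw [Bool.not_eq_true] at h0; simp [pvQ, h0]
          have q1 : pvQ "ARG1" h = false := by
            rw [Bool.not_eq_true] at h1; simp [pvQ, h1]
          simp [q0, q1]

-- B's first/last fold, characterised: state already some (a, b).
theorem pvSpanFold_some (label : String) :
    ∀ (l : List (Int × String)) (a b : Int),
      l.foldl (fun (st : Option (Int × Int)) iv =>
        if pvQ label iv then
          match st with
          | none => some (iv.1, iv.1)
          | some (f, _) => some (f, iv.1)
        else st) (some (a, b))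
      = some (a, ((l.filter (pvQ label)).map (·.1)).getLastD b) := by
  intro l
  induction l with
  | nil => intro a b; simp
  | cons h t ih =>
    intro a b
    rw [List.foldl_cons]
    by_cases hq : pvQ label h = true
    · rw [if_pos hq]
      have hstep : (match (some (a, b) : Option (Int × Int)) with
        | none => some (h.1, h.1)
        | some (f, _) => some (f, h.1)) = some (a, h.1) := rfl
      rw [hstep, ih, List.filter_cons, if_pos hq, List.map_cons, List.getLastD_cons]
    · rw [if_neg hq, ih, List.filter_cons, if_neg hq]

-- B's first/last fold from the empty state.
theorem pvSpanFold (label : String) :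
    ∀ (l : List (Int × String)),
      l.foldl (fun (st : Option (Int × Int)) iv =>
        if pvQ label iv then
          match st with
          | none => some (iv.1, iv.1)
          | some (f, _) => some (f, iv.1)
        else st) none
      = (match (l.filter (pvQ label)).map (·.1) with
         | [] => none
         | h :: t => some (h, t.getLastD h)) := by
  intro l
  induction l with
  | nil => simp
  | cons h t ih =>
    rw [List.foldl_cons]
    by_cases hq : pvQ label h = true
    · rw [if_pos hq]
      have hstep : (match (none : Option (Int × Int)) with
        | none => some (h.1, h.1)
        | some (f, _) => some (f, h.1)) = some (h.1, h.1) := rfl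
      rw [hstep, pvSpanFold_some, List.filter_cons, if_pos hq, List.map_cons]
    · rw [if_neg hq, ih, List.filter_cons, if_neg hq]

theorem pvGetLast?_cons : ∀ (t : List Int) (h : Int), (h :: t).getLast? = some (t.getLastD h) := by
  intro t
  induction t with
  | nil => intro h; rfl
  | cons a as ih =>
    intro h
    rw [List.getLast?_cons_cons, ih, List.getLastD_cons]

-- per-label: B's span equals A's rendering of the collected index list.
theorem pvSpan_eq (label : String) (tags words : List String) :
    pvSpan label tags words
    = (match (((PySem.List.enumerate tags 0).filter (pvQ label)).map (·.1)).head?,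
         (((PySem.List.enumerate tags 0).filter (pvQ label)).map (·.1)).getLast? with
       | some f, some l => PySem.Str.join " " (PySem.List.slice words (some f) (some (l + 1)))
       | _, _ => "") := by
  unfold pvSpan
  rw [pvSpanFold]
  cases hxs : (((PySem.List.enumerate tags 0).filter (pvQ label)).map (·.1)) with
  | nil => rfl
  | cons h t => rw [pvGetLast?_cons]; rfl

-- ===== VERDICT (by name: the statement is the Claim_ definition above) =====
theorem get_arg0_arg1_from_srl_result_spec : Claim_equal_get_arg0_arg1_from_srl_result := by
  intro verb_obj words _ _
  unfold Spec_get_arg0_arg1_from_srl_result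
  unfold get_arg0_arg1_from_srl_result get_arg0_arg1_from_srl_result_alt
  cases hget : (PySem.Dict.mk verb_obj).get? "tags" with
  | none => rfl
  | some tags =>
    simp only []
    rw [pvSpan_eq, pvSpan_eq, pvPairFold_eq]
    rfl
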